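-- pv_equiv track=rewrite | github.com/jsp-KW/Baekjoon- | 프로그래머스/unrated/160586. 대충 만든 자판/대충 만든 자판.py | solution
-- ===== SOURCE A (Python) =====
-- def solution(keymap, targets):
--     answer = []
--
--     dict = {}
--     for i in range(0, len(keymap)):
--         for j in range(0, len(keymap[i])):
--             c = keymap[i][j]
--
--             if c in dict :
--                 dict[c] =  min (dict[c], j+1)
--             else :
--                 dict[c] = j+1
--
--
--     for tar in targets:
--         res =0
--         for t in tar :
--             if t in dict:
--                 res += dict[t]
--
--             else :
--                 res =-1
--                 break
--
--         answer.append(res)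
--
--     return answer
-- ===== SOURCE B (Python) =====
-- def solution(keymap, targets):
--     answer = []
--     for tar in targets:
--         total = 0
--         for t in tar:
--             best = None
--             for row in keymap:
--                 for j, ch in enumerate(row):
--                     if ch == t and (best is None or j + 1 < best):
--                         best = j + 1
--             if best is None:
--                 total = -1
--                 break
--             total += best
--         answer.append(total)
--     return answer
-- ===== Notes on version B (the rewrite author's own statement) =====
-- stated objective: alternative
-- what changed: Replaced A's precomputed char-to-minimum-position dictionary with a direct rescan of the whole keymap (all rows, all positions) for every target character, taking the running minimum position on the fly.
import Mathlib
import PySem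

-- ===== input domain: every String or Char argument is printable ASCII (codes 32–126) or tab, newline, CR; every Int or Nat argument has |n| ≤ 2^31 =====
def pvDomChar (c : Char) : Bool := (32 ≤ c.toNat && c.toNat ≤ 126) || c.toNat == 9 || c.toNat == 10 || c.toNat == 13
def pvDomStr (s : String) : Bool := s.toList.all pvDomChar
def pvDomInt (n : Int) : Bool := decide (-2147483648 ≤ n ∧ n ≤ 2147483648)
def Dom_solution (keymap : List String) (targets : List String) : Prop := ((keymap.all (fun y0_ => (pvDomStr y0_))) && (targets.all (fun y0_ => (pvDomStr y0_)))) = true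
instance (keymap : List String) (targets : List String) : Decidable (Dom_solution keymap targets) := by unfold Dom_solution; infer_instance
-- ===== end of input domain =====

-- B drops A's precomputed char→min-position dict and instead rescans the whole keymap for each
-- target character, taking the minimum 1-based position on the fly (objective: alternative, not faster).

-- ===== PORT A =====
-- inner dict-building step: one character at position j (c in dict ? min : insert)
def stepA (d : PySem.Dict Char Int) (jc : Int × Char) : PySem.Dict Char Int :=
  match d.get? jc.2 with
  | some v => d.insert jc.2 (min v (jc.1 + 1))
  | none => d.insert jc.2 (jc.1 + 1)

-- one row of the dict-building loop ('for j in range(0, len(keymap[i]))')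
def rowStepA (d : PySem.Dict Char Int) (s : String) : PySem.Dict Char Int :=
  (PySem.List.enumerate s.toList 0).foldl stepA d

-- the loop 'for t in tar' with its running sum and break-with -1
def costA (d : PySem.Dict Char Int) : List Char → Int → Int
  | [], res => res
  | t :: ts, res =>
    match d.get? t with
    | some v => costA d ts (res + v)
    | none => -1

def solution (keymap : List String) (targets : List String) : List Int :=
  let dict := keymap.foldl rowStepA PySem.Dict.empty
  targets.foldl (fun answer tar => answer ++ [costA dict tar.toList 0]) []

-- ===== PORT B =====
-- inner scan step: keep the best (smallest) 1-based position of t seen so far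
def stepB (t : Char) (best : Option Int) (jc : Int × Char) : Option Int :=
  if jc.2 = t then
    match best with
    | none => some (jc.1 + 1)
    | some b => if jc.1 + 1 < b then some (jc.1 + 1) else some b
  else best

-- scan every row of keymap for character t ('for row in keymap: for j, ch in enumerate(row)')
def bestPos (keymap : List String) (t : Char) : Option Int :=
  keymap.foldl (fun best row => (PySem.List.enumerate row.toList 0).foldl (stepB t) best) none

-- the loop 'for t in tar' accumulating total, break-with -1 when no position found
def costB (keymap : List String) : List Char → Int → Int
  | [], tot => tot
  | t :: ts, tot =>
    match bestPos keymap t with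
    | some b => costB keymap ts (tot + b)
    | none => -1

def solution_alt (keymap : List String) (targets : List String) : List Int :=
  targets.foldl (fun answer tar => answer ++ [costB keymap tar.toList 0]) []

-- ===== PRECONDITION & SPEC =====
def Spec_solution (keymap : List String) (targets : List String) (out : List Int) : Prop := out = solution_alt keymap targets
instance (keymap : List String) (targets : List String) (out : List Int) : Decidable (Spec_solution keymap targets out) := by unfold Spec_solution; infer_instance

-- ===== CLAIM (what is proved, stated in full; the proofs are below) =====
def Claim_equal_solution : Prop := ∀ (keymap : List String) (targets : List String), Dom_solution keymap targets → Spec_solution keymap targets (solution keymap targets)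

-- ===== LEMMAS AND PROOFS =====

-- one dict-building step, observed at a fixed key c, is B's scan step
lemma get?_stepA (c : Char) (d : PySem.Dict Char Int) (jc : Int × Char) :
    (stepA d jc).get? c = stepB c (d.get? c) jc := by
  unfold stepA stepB
  by_cases h : jc.2 = c
  · subst h
    rw [if_pos rfl]
    cases hv : d.get? jc.2 with
    | none => dsimp only; rw [PySem.Dict.get?_insert_self]
    | some v =>
      dsimp only
      rw [PySem.Dict.get?_insert_self]
      split_ifs with hlt
      · rw [min_eq_right hlt.le]
      · rw [min_eq_left (by omega)]
  · rw [if_neg h]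
    cases hv : d.get? jc.2 with
    | none => dsimp only; rw [PySem.Dict.get?_insert_of_ne _ _ (Ne.symm h)]
    | some v => dsimp only; rw [PySem.Dict.get?_insert_of_ne _ _ (Ne.symm h)]

-- the inner fold (one row), observed at c, is B's inner fold
lemma get?_foldl_stepA (c : Char) (l : List (Int × Char)) (d : PySem.Dict Char Int) :
    (l.foldl stepA d).get? c = l.foldl (stepB c) (d.get? c) := by
  induction l generalizing d with
  | nil => rfl
  | cons jc l ih => simp [List.foldl_cons, ih, get?_stepA]

-- A's whole dict, looked up at c, is exactly B's bestPos
lemma get?_buildDict (keymap : List String) (c : Char) :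
    (keymap.foldl rowStepA PySem.Dict.empty).get? c = bestPos keymap c := by
  unfold bestPos
  rw [show ((none : Option Int) = (PySem.Dict.empty : PySem.Dict Char Int).get? c) from rfl]
  generalize (PySem.Dict.empty : PySem.Dict Char Int) = d
  induction keymap generalizing d with
  | nil => rfl
  | cons s km ih => simp [List.foldl_cons, ih, rowStepA, get?_foldl_stepA]

-- the per-target loops agree
lemma costA_eq_costB (keymap : List String) (l : List Char) (res : Int) :
    costA (keymap.foldl rowStepA PySem.Dict.empty) l res = costB keymap l res := by
  induction l generalizing res with
  | nil => rfl
  | cons t ts ih =>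
    simp only [costA, costB, get?_buildDict]
    cases bestPos keymap t <;> simp [ih]

-- ===== VERDICT (by name: the statement is the Claim_ definition above) =====
theorem solution_spec : Claim_equal_solution := by
  intro keymap targets _
  unfold Spec_solution solution solution_alt
  simp only [costA_eq_costB]
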